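-- pv_equiv track=rewrite | github.com/Lautiim/ayed1-2025-tps | TP3/Ejercicio_02.py | matriz_f
-- ===== SOURCE A (Python) =====
-- def matriz_f(n: int) -> list[list[int]]:
--     """
--     Genera matriz con triangulo inferior derecha numerado.
--
--     Pre: n > 0.
--
--     Post: region donde j >= n-1-i se llena con 1..; resto 0.
--     """
--     m = [[0] * n for _ in range(n)]
--     num = 1
--     for i in range(n):
--         for offset in range(i + 1):
--             j = n - 1 - offset
--             m[i][j] = num
--             num += 1
--     return m
-- ===== SOURCE B (Python) =====
-- def matriz_f(n: int) -> list[list[int]]: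
--     """
--     Genera matriz con triangulo inferior derecha numerado.
--
--     Pre: n > 0.
--
--     Post: region donde j >= n-1-i se llena con 1..; resto 0.
--     """
--     return [[0] * (n - 1 - i) + list(range(i * (i + 1) // 2 + i + 1, i * (i + 1) // 2, -1))
--             for i in range(n)]
-- ===== Notes on version B (the rewrite author's own statement) =====
-- stated objective: alternative
-- what changed: Replaces the running counter over a mutable matrix by a closed form: each row is built directly as a zero prefix followed by a descending block of consecutive numbers starting from the triangular-number formula, with no per-cell counter state.
import Mathlib
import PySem

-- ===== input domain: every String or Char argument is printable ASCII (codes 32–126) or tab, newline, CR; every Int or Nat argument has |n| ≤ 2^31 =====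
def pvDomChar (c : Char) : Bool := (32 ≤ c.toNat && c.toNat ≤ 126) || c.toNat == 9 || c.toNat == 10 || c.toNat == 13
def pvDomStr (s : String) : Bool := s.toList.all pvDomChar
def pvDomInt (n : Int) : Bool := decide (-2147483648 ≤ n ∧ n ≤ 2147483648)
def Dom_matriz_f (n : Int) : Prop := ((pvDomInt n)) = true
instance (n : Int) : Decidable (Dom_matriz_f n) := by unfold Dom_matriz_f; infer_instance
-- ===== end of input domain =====

-- B builds each row directly as a zero prefix plus a descending block from the triangular-number closed form, instead of A's running counter over a mutable matrix (alternative decomposition).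

-- ===== PORT A =====
-- inner loop body: j = n - 1 - offset; m[i][j] = num; num += 1
def aInner (n i : Int) (st : List (List Int) × Int) (offset : Int) : List (List Int) × Int :=
  let j := n - 1 - offset
  (PySem.List.pySetD st.1 i (PySem.List.pySetD (PySem.List.pyGetD st.1 i []) j st.2), st.2 + 1)

-- outer loop body: for offset in range(i + 1): ...
def aOuter (n : Int) (st : List (List Int) × Int) (i : Int) : List (List Int) × Int :=
  (PySem.List.pyRange 0 (i + 1) 1).foldl (aInner n i) st

def matriz_f (n : Int) : List (List Int) :=
  ((PySem.List.pyRange 0 n 1).foldl (aOuter n)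
    ((PySem.List.pyRange 0 n 1).map (fun _ => PySem.List.pyRepeat [(0 : Int)] n), 1)).1

-- ===== PORT B =====
def matriz_f_alt (n : Int) : List (List Int) :=
  (PySem.List.pyRange 0 n 1).map (fun i =>
    PySem.List.pyRepeat [(0 : Int)] (n - 1 - i) ++
      PySem.List.pyRange (PySem.Int.floordiv (i * (i + 1)) 2 + i + 1)
        (PySem.Int.floordiv (i * (i + 1)) 2) (-1))

-- ===== PRECONDITION & SPEC =====
def Spec_matriz_f (n : Int) (out : List (List Int)) : Prop := out = matriz_f_alt n
instance (n : Int) (out : List (List Int)) : Decidable (Spec_matriz_f n out) := by unfold Spec_matriz_f; infer_instance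

-- ===== CLAIM (what is proved, stated in full; the proofs are below) =====
def Claim_equal_matriz_f : Prop := ∀ (n : Int), Dom_matriz_f n → Spec_matriz_f n (matriz_f n)

-- ===== LEMMAS AND PROOFS =====

-- value of cell (i, j) after A's row i is fully processed (B's closed form)
def cellF (n i j : Int) : Int :=
  if n - 1 - j ≤ i then PySem.Int.floordiv (i * (i + 1)) 2 + (n - 1 - j) + 1 else 0

-- value of cell j of row i after t inner iterations starting with counter num
def prow (n num t j : Int) : Int := if n - 1 - j < t then num + (n - 1 - j) else 0

-- B's row i equals the pointwise closed-form row
lemma rowB_eq (n i : Int) (hi : 0 ≤ i) (hin : i < n) :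
    PySem.List.pyRepeat [(0 : Int)] (n - 1 - i) ++
      PySem.List.pyRange (PySem.Int.floordiv (i * (i + 1)) 2 + i + 1)
        (PySem.Int.floordiv (i * (i + 1)) 2) (-1)
    = (PySem.List.pyRange 0 n 1).map (cellF n i) := by
  have hT : PySem.Int.floordiv (i * (i + 1)) 2 + i + 1 - PySem.Int.floordiv (i * (i + 1)) 2
      = i + 1 := by ring
  rw [PySem.List.pyRepeat_singleton, PySem.List.pyRange_neg_one, hT]
  apply List.ext_getElem
  · simp [PySem.List.length_pyRange_one]; omega
  · intro k h1 h2
    simp only [List.getElem_map, PySem.List.getElem_pyRange_one]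
    by_cases hk : k < (n - 1 - i).toNat
    · rw [List.getElem_append_left (by simpa using hk)]
      simp only [List.getElem_replicate, cellF]
      split_ifs with hc
      · exfalso; omega
      · rfl
    · rw [List.getElem_append_right (by simpa using hk)]
      simp only [List.getElem_map, List.getElem_range, List.length_replicate]
      have hk' : (n - 1 - i).toNat ≤ k := by omega
      have hc1 : ((n - 1 - i).toNat : Int) = n - 1 - i := by omega
      have hc2 : ((k - (n - 1 - i).toNat : Nat) : Int) = (k : Int) - (n - 1 - i) := by
        push_cast [hk']; omega
      have hcond : n - 1 - (0 + (k : Int)) ≤ i := by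
        have := h2
        simp [PySem.List.length_pyRange_one] at this
        omega
      simp only [cellF, if_pos hcond]
      omega

-- pySetD at an in-range index on a map over a range, as a map again
lemma setD_map_range {α : Type} (n : Int) (f : Int → α) (i : Int) (hi : 0 ≤ i) (hin : i < n)
    (v : α) :
    PySem.List.pySetD ((PySem.List.pyRange 0 n 1).map f) i v
      = (PySem.List.pyRange 0 n 1).map (fun a => if a = i then v else f a) := by
  rw [PySem.List.pySetD_of_nonneg _ v hi]
  apply List.ext_getElem
  · simp
  · intro k h1 h2
    simp only [List.getElem_set, List.getElem_map, PySem.List.getElem_pyRange_one]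
    have hk : (k : Int) < n := by
      have := h1; simp [PySem.List.length_pyRange_one] at this; omega
    by_cases h : i.toNat = k
    · have : (0 : Int) + (k : Int) = i := by omega
      simp [h, this]
    · have hne : ¬ ((k : Int) = i) := by omega
      simp [h, hne]

lemma getD_map_range' (n : Int) (f : Int → List Int) (i : Int) (hi : 0 ≤ i) (hin : i < n) :
    PySem.List.pyGetD ((PySem.List.pyRange 0 n 1).map f) i [] = f i :=
  PySem.List.pyGetD_map_pyRange_of_nonneg f n i [] hi hin

lemma zrow_eq (n : Int) :
    PySem.List.pyRepeat [(0 : Int)] n = (PySem.List.pyRange 0 n 1).map (fun _ => (0 : Int)) := by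
  rw [PySem.List.pyRepeat_singleton]
  apply List.ext_getElem
  · simp [PySem.List.length_pyRange_one]
  · intro k h1 h2; simp

-- inner loop invariant
lemma inner_inv (n i num : Int) (f : Int → List Int) (hi : 0 ≤ i) (hin : i < n)
    (hfi : f i = (PySem.List.pyRange 0 n 1).map (prow n num 0)) :
    ∀ t : Nat, (t : Int) ≤ i + 1 →
      (PySem.List.pyRange 0 (t : Int) 1).foldl (aInner n i)
          ((PySem.List.pyRange 0 n 1).map f, num)
        = ((PySem.List.pyRange 0 n 1).map
            (fun a => if a = i then (PySem.List.pyRange 0 n 1).map (prow n num (t : Int)) else f a),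
           num + (t : Int)) := by
  intro t
  induction t with
  | zero =>
    intro _
    simp only [Nat.cast_zero]
    rw [PySem.List.pyRange_one_eq_nil (a := 0) (b := 0) le_rfl]
    simp only [List.foldl_nil, add_zero]
    congr 1
    apply List.map_congr_left
    intro a _
    by_cases h : a = i
    · simp [h, hfi]
    · simp [h]
  | succ t ih =>
    intro ht
    have ht' : (t : Int) ≤ i + 1 := by push_cast at ht ⊢; omega
    have hpeel : PySem.List.pyRange 0 ((t : Nat) + 1 : Int) 1
        = PySem.List.pyRange 0 (t : Int) 1 ++ [(t : Int)] := by
      have := PySem.List.pyRange_one_succ_right (a := 0) (b := (t : Int)) (by omega)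
      simpa using this
    rw [show (((t + 1 : Nat)) : Int) = ((t : Nat) : Int) + 1 by push_cast; ring] at *
    rw [hpeel, List.foldl_append, ih ht', List.foldl_cons, List.foldl_nil]
    unfold aInner
    simp only
    have hget : PySem.List.pyGetD ((PySem.List.pyRange 0 n 1).map
        (fun a => if a = i then (PySem.List.pyRange 0 n 1).map (prow n num (t : Int)) else f a)) i []
        = (PySem.List.pyRange 0 n 1).map (prow n num (t : Int)) := by
      rw [getD_map_range' n _ i hi hin]; simp
    rw [hget]
    have hj1 : (0 : Int) ≤ n - 1 - (t : Int) := by omega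
    have hj2 : n - 1 - (t : Int) < n := by omega
    rw [setD_map_range n (prow n num (t : Int)) (n - 1 - (t : Int)) hj1 hj2 (num + (t : Int))]
    rw [setD_map_range n _ i hi hin]
    simp only [Prod.mk.injEq]
    refine ⟨?_, ?_⟩
    · apply List.map_congr_left
      intro a ha
      by_cases h : a = i
      · simp only [h]
        apply List.map_congr_left
        intro b hb
        rw [PySem.List.mem_pyRange_one] at hb
        unfold prow
        by_cases hbe : b = n - 1 - (t : Int)
        · have h1 : n - 1 - b < (t : Int) + 1 := by omega
          have h2 : num + (t : Int) = num + (n - 1 - b) := by omega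
          simp [hbe]
        · have : ¬ (n - 1 - b = (t : Int)) := by omega
          split_ifs <;> simp_all <;> omega
      · simp [h]
    · ring

-- outer loop invariant
lemma outer_inv (n : Int) (hn : 0 < n) :
    ∀ k : Nat, (k : Int) ≤ n →
      (PySem.List.pyRange 0 (k : Int) 1).foldl (aOuter n)
          ((PySem.List.pyRange 0 n 1).map (fun _ => PySem.List.pyRepeat [(0 : Int)] n), 1)
        = ((PySem.List.pyRange 0 n 1).map
            (fun a => if a < (k : Int) then (PySem.List.pyRange 0 n 1).map (cellF n a)
                     else PySem.List.pyRepeat [(0 : Int)] n),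
           PySem.Int.floordiv ((k : Int) * ((k : Int) + 1)) 2 + 1) := by
  intro k
  induction k with
  | zero =>
    intro _
    simp only [Nat.cast_zero]
    rw [PySem.List.pyRange_one_eq_nil (a := 0) (b := 0) le_rfl]
    simp only [List.foldl_nil, Prod.mk.injEq]
    refine ⟨?_, ?_⟩
    · apply List.map_congr_left
      intro a ha
      rw [PySem.List.mem_pyRange_one] at ha
      have : ¬ (a < (0 : Int)) := by omega
      simp [this]
    · decide
  | succ k ih =>
    intro hk
    have hk' : (k : Int) ≤ n := by push_cast at hk ⊢; omega
    have hkn : (k : Int) < n := by push_cast at hk; omega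
    have hk0 : (0 : Int) ≤ (k : Int) := by omega
    have hpeel : PySem.List.pyRange 0 ((k : Nat) + 1 : Int) 1
        = PySem.List.pyRange 0 (k : Int) 1 ++ [(k : Int)] := by
      have := PySem.List.pyRange_one_succ_right (a := 0) (b := (k : Int)) (by omega)
      simpa using this
    rw [show (((k + 1 : Nat)) : Int) = ((k : Nat) : Int) + 1 by push_cast; ring] at *
    rw [hpeel, List.foldl_append, ih hk', List.foldl_cons, List.foldl_nil]
    unfold aOuter
    set num := PySem.Int.floordiv ((k : Int) * ((k : Int) + 1)) 2 + 1 with hnum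
    have hfk : (fun a => if a < (k : Int) then (PySem.List.pyRange 0 n 1).map (cellF n a)
        else PySem.List.pyRepeat [(0 : Int)] n) (k : Int)
        = (PySem.List.pyRange 0 n 1).map (prow n num 0) := by
      simp only [lt_irrefl]
      rw [zrow_eq]
      apply List.map_congr_left
      intro b hb
      rw [PySem.List.mem_pyRange_one] at hb
      unfold prow
      have : ¬ (n - 1 - b < (0 : Int)) := by omega
      simp [this]
    have := inner_inv n (k : Int) num (fun a => if a < (k : Int) then (PySem.List.pyRange 0 n 1).map (cellF n a) else PySem.List.pyRepeat [(0 : Int)] n) hk0 hkn hfk (k + 1) (by push_cast; omega)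
    rw [show (((k + 1 : Nat)) : Int) = ((k : Nat) : Int) + 1 by push_cast; ring] at this
    rw [this]
    simp only [Prod.mk.injEq]
    have hdiv : ∀ m : Int, 0 ≤ m → PySem.Int.floordiv m 2 = m / 2 := fun m _ =>
      PySem.Int.floordiv_eq_ediv_of_pos (by omega)
    refine ⟨?_, ?_⟩
    · apply List.map_congr_left
      intro a ha
      rw [PySem.List.mem_pyRange_one] at ha
      by_cases h : a = (k : Int)
      · simp only [h, if_pos (show (k : Int) < (k : Int) + 1 by omega)]
        apply List.map_congr_left
        intro b hb
        rw [PySem.List.mem_pyRange_one] at hb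
        unfold prow cellF
        rw [hnum, hdiv _ (by nlinarith)]
        have hK : (0 : Int) ≤ (k : Int) * ((k : Int) + 1) := by nlinarith
        split_ifs <;> omega
      · by_cases h2 : a < (k : Int)
        · simp [h, h2, show a < (k : Int) + 1 by omega]
        · simp [h, h2, show ¬ (a < (k : Int) + 1) by omega]
    · rw [hnum, hdiv _ (by nlinarith), hdiv _ (by nlinarith)]
      have hK : (0 : Int) ≤ (k : Int) * ((k : Int) + 1) := by nlinarith
      have hexp : ((k : Int) + 1) * (((k : Int) + 1) + 1) = (k : Int) * ((k : Int) + 1) + 2 * ((k : Int) + 1) := by ring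
      rw [hexp]
      omega

-- ===== VERDICT (by name: the statement is the Claim_ definition above) =====
theorem matriz_f_spec : Claim_equal_matriz_f := by
  intro n _
  unfold Spec_matriz_f matriz_f matriz_f_alt
  by_cases hn : n ≤ 0
  · rw [PySem.List.pyRange_one_eq_nil hn]
    simp
  · push_neg at hn
    have hcast : ((n.toNat : Nat) : Int) = n := by omega
    have h := outer_inv n hn n.toNat (by omega)
    rw [hcast] at h
    rw [h]
    apply List.map_congr_left
    intro a ha
    rw [PySem.List.mem_pyRange_one] at ha
    rw [if_pos ha.2]
    exact (rowB_eq n a ha.1 ha.2).symm
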